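-- pv_equiv track=rewrite | github.com/evawxiao/CS73 | moviecorpus.py | clean_ap_line
-- ===== SOURCE A (Python) =====
-- import copy
--
-- def clean_ap_line(string):
--     copied = copy.deepcopy(string)
--
--     if ord(copied[0]) == 123:
--         i = 1
--         while ord(copied[i]) != 125:
--             i += 1
--         i += 1
--         while ord(copied[i]) != 125:
--             i += 1
--         copied = copied[i + 1:]
--
--     return copied
-- ===== SOURCE B (Python) =====
-- def clean_ap_line(string):
--     if ord(string[0]) != 123:
--         return string
--     return string.split('}', 2)[2]
-- ===== Notes on version B (the rewrite author's own statement) =====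
-- stated objective: simpler
-- what changed: Replaces the two manual index-advancing while-loops and the slice with a single str.split on the closing-brace separator with maxsplit 2, returning the third piece (indexing it reproduces the IndexError when fewer than two closing braces exist).
import Mathlib
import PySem

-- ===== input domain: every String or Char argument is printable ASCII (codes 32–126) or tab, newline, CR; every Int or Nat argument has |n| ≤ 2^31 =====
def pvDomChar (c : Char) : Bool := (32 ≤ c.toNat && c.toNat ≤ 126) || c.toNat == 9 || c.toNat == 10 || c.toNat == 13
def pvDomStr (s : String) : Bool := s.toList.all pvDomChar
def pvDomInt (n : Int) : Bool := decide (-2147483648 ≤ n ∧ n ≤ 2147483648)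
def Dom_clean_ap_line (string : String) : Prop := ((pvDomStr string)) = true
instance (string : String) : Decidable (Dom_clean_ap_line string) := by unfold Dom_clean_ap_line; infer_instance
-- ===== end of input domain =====

-- B replaces A's two index-advancing scan loops by a single split on the closing-brace
-- separator (maxsplit 2), taking the third piece; simpler, same cost.

-- ===== PORT A =====
-- the while-loop 'while ord(copied[i]) != 125: i += 1' starting at index i over the
-- suffix 'cs' of the string: returns the index of the first closing brace, none = runs off the
-- end (IndexError, excluded by Pre_)
def pvFindClose : List Char → Nat → Option Nat
  | [], _ => none
  | c :: r, i => if c = '}' then some i else pvFindClose r (i + 1)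

def clean_ap_line (string : String) : String :=
  let copied := string
  let cs := copied.toList
  match cs.head? with
  | none => ""            -- copied[0]: IndexError (outside Pre_)
  | some c =>
    if c.toNat == 123 then
      match pvFindClose (cs.drop 1) 1 with    -- first while-loop, starting at i = 1
      | none => ""        -- IndexError (outside Pre_)
      | some i1 =>
        match pvFindClose (cs.drop (i1 + 1)) (i1 + 1) with  -- second while-loop
        | none => ""      -- IndexError (outside Pre_)
        | some i2 => String.ofList (cs.drop (i2 + 1))  -- copied[i+1:], i+1 ≥ 0: slice = drop
    else copied

-- ===== PORT B =====
-- string.split(sep, maxsplit): peel off a piece before each of the first `n`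
-- occurrences of the separator, keep the remainder as the last piece (Python's split semantics)
def pvSplit : List Char → Nat → List (List Char)
  | cs, 0 => [cs]
  | cs, Nat.succ n =>
    match cs.span (fun c => c != '}') with
    | (_, []) => [cs]                          -- no separator left: one final piece
    | (pre, _ :: r) => pre :: pvSplit r n

def clean_ap_line_alt (string : String) : String :=
  let cs := string.toList
  match cs.head? with
  | none => ""            -- string[0]: IndexError (outside Pre_)
  | some c =>
    if c.toNat != 123 then string
    else
      match (pvSplit cs 2)[2]? with
      | none => ""        -- [2]: IndexError (outside Pre_)
      | some piece => String.ofList piece      -- the third split piece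

-- ===== PRECONDITION & SPEC =====
-- Pre_ excludes exactly the inputs on which A raises IndexError: the empty string, and
-- strings that start with an opening brace but contain fewer than two closing braces
-- after the first position (B raises IndexError there too).
def Pre_clean_ap_line (string : String) : Prop :=
  string.toList ≠ [] ∧
    (string.toList.head? = some '{' → 2 ≤ (string.toList.drop 1).count '}')
instance (string : String) : Decidable (Pre_clean_ap_line string) := by
  unfold Pre_clean_ap_line; infer_instance
def pvWitness_clean_ap_line : String := "{a}b}c"

def Spec_clean_ap_line (string : String) (out : String) : Prop := out = clean_ap_line_alt string
instance (string : String) (out : String) : Decidable (Spec_clean_ap_line string out) := by unfold Spec_clean_ap_line; infer_instance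

-- ===== CLAIM (what is proved, stated in full; the proofs are below) =====
def Claim_equal_clean_ap_line : Prop := ∀ (string : String), Dom_clean_ap_line string → Pre_clean_ap_line string → Spec_clean_ap_line string (clean_ap_line string)

-- ===== LEMMAS AND PROOFS =====

-- the scan's start index is a pure offset
theorem pvFindClose_shift (cs : List Char) (i : Nat) :
    pvFindClose cs i = (pvFindClose cs 0).map (· + i) := by
  induction cs generalizing i with
  | nil => rfl
  | cons c r ih =>
    simp only [pvFindClose]
    split
    · simp
    · rw [ih (i + 1), ih 1]
      cases pvFindClose r 0 <;> simp <;> omega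

-- the split step against the stop-early scan: either no separator at all (scan = none), or
-- the scan returns the length of the kept prefix, and what follows the separator is a drop
theorem span_find (cs : List Char) :
    (cs.dropWhile (fun c => c != '}') = [] ∧ pvFindClose cs 0 = none) ∨
    (∃ r, cs.dropWhile (fun c => c != '}') = '}' :: r ∧
      pvFindClose cs 0 = some (cs.takeWhile (fun c => c != '}')).length ∧
      r = cs.drop ((cs.takeWhile (fun c => c != '}')).length + 1) ∧
      (cs.takeWhile (fun c => c != '}')).count '}' = 0) := by
  induction cs with
  | nil => exact Or.inl ⟨rfl, rfl⟩
  | cons c r ih =>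
    by_cases hc : c = '}'
    · refine Or.inr ⟨r, ?_, ?_, ?_, ?_⟩
      · simp [List.dropWhile_cons, hc]
      · simp [pvFindClose, hc, List.takeWhile_cons]
      · simp [List.takeWhile_cons, hc]
      · simp [List.takeWhile_cons, hc]
    · have hqc : (c != '}') = true := by simpa using hc
      have htw : (c :: r).takeWhile (fun c => c != '}')
          = c :: r.takeWhile (fun c => c != '}') := by
        simp [List.takeWhile_cons, hqc]
      have hdw : (c :: r).dropWhile (fun c => c != '}')
          = r.dropWhile (fun c => c != '}') := by
        simp [List.dropWhile_cons, hqc]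
      have hfc : pvFindClose (c :: r) 0 = (pvFindClose r 0).map (· + 1) := by
        simp [pvFindClose, hc, pvFindClose_shift r 1]
      rcases ih with ⟨hp, hn⟩ | ⟨r2, hp, hsome, hdrop, hcnt⟩
      · exact Or.inl ⟨hdw.trans hp, by simp [hfc, hn]⟩
      · refine Or.inr ⟨r2, hdw.trans hp, ?_, ?_, ?_⟩
        · simp [hfc, hsome, htw]
        · simp [htw, hdrop]
        · simp [htw, List.count_cons, hc, hcnt]

-- a scan that finds nothing means no closing brace present
theorem pvFindClose_none_count (cs : List Char)
    (h : pvFindClose cs 0 = none) : cs.count '}' = 0 := by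
  induction cs with
  | nil => rfl
  | cons c r ih =>
    simp only [pvFindClose] at h
    split at h
    · exact absurd h (by simp)
    · rw [pvFindClose_shift r 1] at h
      have hr : pvFindClose r 0 = none := by
        cases hE : pvFindClose r 0 <;> simp [hE] at h ⊢
      simp [List.count_cons, ih hr]
      rename_i hcc; simpa using hcc

-- ===== VERDICT (by name: the statement is the Claim_ definition above) =====
theorem clean_ap_line_spec : Claim_equal_clean_ap_line := by
  intro string _ hpre
  unfold Spec_clean_ap_line clean_ap_line clean_ap_line_alt
  obtain ⟨hne, hbr⟩ := hpre
  cases hcs : string.toList with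
  | nil => exact absurd hcs hne
  | cons c rest =>
    simp only [hcs, List.head?_cons]
    by_cases hc : c.toNat == 123
    · have hcbrace : c = '{' := by
        have hn : c.toNat = 123 := by simpa using hc
        exact Char.ext (UInt32.toNat_inj.mp (hn.trans (by decide)))
      have hcount : 2 ≤ rest.count '}' := by
        have := hbr (by simp [hcs, hcbrace])
        simpa [hcs] using this
      -- first closing brace of rest, via the split step
      rcases span_find rest with ⟨_, hn1⟩ | ⟨r1, hp1, hf1, hr1, hcnt1⟩
      · exact absurd (pvFindClose_none_count rest hn1) (by omega)
      set tw1 := rest.takeWhile (fun c => c != '}') with htw1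
      -- rest decomposes around that first closing brace
      have hdecomp : rest = tw1 ++ ('}' :: r1) := by
        rw [htw1, ← hp1]
        exact (List.takeWhile_append_dropWhile).symm
      have hcount1 : 1 ≤ r1.count '}' := by
        have : rest.count '}' = tw1.count '}' + (1 + r1.count '}') := by
          rw [hdecomp]; simp [List.count_append, List.count_cons]; omega
        omega
      -- second closing brace (first of r1)
      rcases span_find r1 with ⟨_, hn2⟩ | ⟨r2, hp2, hf2, hr2, _⟩
      · exact absurd (pvFindClose_none_count r1 hn2) (by omega)
      set tw2 := r1.takeWhile (fun c => c != '}') with htw2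
      -- A, first loop: over (c::rest).drop 1 = rest, from index 1
      have hA1 : pvFindClose ((c :: rest).drop 1) 1 = some (tw1.length + 1) := by
        rw [List.drop_one, List.tail_cons, pvFindClose_shift rest 1, hf1]; rfl
      -- A, second loop: the suffix after the first closing brace is r1
      have hdropr1 : (c :: rest).drop (tw1.length + 1 + 1) = r1 := by
        have h1 : (c :: rest).drop (tw1.length + 2) = rest.drop (tw1.length + 1) := by
          simp [List.drop_succ_cons]
        rw [show tw1.length + 1 + 1 = tw1.length + 2 from rfl, h1, ← hr1]
      have hA2 : pvFindClose ((c :: rest).drop (tw1.length + 1 + 1)) (tw1.length + 1 + 1)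
          = some (tw2.length + (tw1.length + 1 + 1)) := by
        rw [hdropr1, pvFindClose_shift r1 (tw1.length + 1 + 1), hf2]; rfl
      -- A's final slice equals r2
      have hAslice : (c :: rest).drop (tw2.length + (tw1.length + 1 + 1) + 1) = r2 := by
        have h1 : (c :: rest).drop (tw2.length + (tw1.length + 1 + 1) + 1)
            = rest.drop (tw1.length + 1 + (tw2.length + 1)) := by
          rw [show tw2.length + (tw1.length + 1 + 1) + 1
              = (tw1.length + 1 + (tw2.length + 1)) + 1 by omega]
          simp [List.drop_succ_cons]
        rw [h1, ← List.drop_drop, ← hr1, ← hr2]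
      -- B's split produces three pieces, the third being r2
      have hqc : (c != '}') = true := by rw [hcbrace]; decide
      have hspFull : (c :: rest).span (fun c => c != '}') = (c :: tw1, '}' :: r1) := by
        simp [List.span_eq_takeWhile_dropWhile, List.takeWhile_cons,
          List.dropWhile_cons, hqc, hp1, ← htw1]
      have hspR1 : r1.span (fun c => c != '}') = (tw2, '}' :: r2) := by
        simp [List.span_eq_takeWhile_dropWhile, hp2, ← htw2]
      have hB : pvSplit (c :: rest) 2 = [c :: tw1, tw2, r2] := by
        show pvSplit (c :: rest) (Nat.succ 1) = _
        rw [pvSplit, hspFull]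
        show _ :: pvSplit r1 (Nat.succ 0) = _
        rw [pvSplit, hspR1]
        rfl
      have hcne : (c.toNat != 123) = false := by rw [hcbrace]; decide
      simp only [hc, if_true, hA1, hA2, hB, hcne, Bool.false_eq_true, if_false]
      simp [hAslice]
    · have hcne : (c.toNat != 123) = true := by simpa using hc
      simp [hc, hcne]
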